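-- pv_equiv track=rewrite | github.com/Kxrbx/Clawlet | clawlet/benchmarks/release_gate.py | _summarize_gate_breaches
-- ===== SOURCE A (Python) =====
-- def _summarize_gate_breaches(reasons: list[str], max_items: int = 30) -> tuple[list[str], dict[str, int]]:
--     categories = ["local", "corpus", "lane", "context", "coding", "comparison", "other"]
--     buckets: dict[str, list[str]] = {k: [] for k in categories}
--     for reason in reasons:
--         text = str(reason)
--         lowered = text.lower()
--         if lowered.startswith("local:"):
--             buckets["local"].append(text)
--         elif lowered.startswith("corpus:"):
--             buckets["corpus"].append(text)
--         elif lowered.startswith("lane_scheduling:"):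
--             buckets["lane"].append(text)
--         elif lowered.startswith("context_cache:"):
--             buckets["context"].append(text)
--         elif lowered.startswith("coding_loop:"):
--             buckets["coding"].append(text)
--         elif lowered.startswith("comparison:"):
--             buckets["comparison"].append(text)
--         else:
--             buckets["other"].append(text)
--
--     out: list[str] = []
--     for key in categories:
--         for item in buckets[key]:
--             out.append(f"{key}: {item}")
--             if len(out) >= max_items:
--                 break
--         if len(out) >= max_items:
--             break
--
--     counts = {k: len(v) for k, v in buckets.items() if v}
--     return out, counts
-- ===== SOURCE B (Python) =====
-- _PREFIXES = [
--     ("local:", "local"),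
--     ("corpus:", "corpus"),
--     ("lane_scheduling:", "lane"),
--     ("context_cache:", "context"),
--     ("coding_loop:", "coding"),
--     ("comparison:", "comparison"),
-- ]
--
--
-- def _summarize_gate_breaches(reasons: list[str], max_items: int = 30) -> tuple[list[str], dict[str, int]]:
--     tagged = []
--     for reason in reasons:
--         text = str(reason)
--         lowered = text.lower()
--         idx, cat = 6, "other"
--         for i, (prefix, name) in enumerate(_PREFIXES):
--             if lowered.startswith(prefix):
--                 idx, cat = i, name
--                 break
--         tagged.append((idx, cat, text))
--     tagged.sort(key=lambda t: t[0])  # stable: keeps input order inside a category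
--
--     out: list[str] = []
--     for _, cat, text in tagged:
--         out.append(f"{cat}: {text}")
--         if len(out) >= max_items:
--             break
--
--     counts: dict[str, int] = {}
--     for _, cat, _text in tagged:
--         counts[cat] = counts.get(cat, 0) + 1
--     return out, counts
-- ===== Notes on version B (the rewrite author's own statement) =====
-- stated objective: alternative
-- what changed: Replaces A's seven-bucket dict plus nested per-category emission loops by a single tagging pass, one stable sort on the category index, one flat truncation loop and a counter dict emitted in sorted order.
-- outside the precondition, e.g. on _summarize_gate_breaches(['x'], 0): A returns ([], {'other': 1}), B returns (['other: x'], {'other': 1})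
import Mathlib
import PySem

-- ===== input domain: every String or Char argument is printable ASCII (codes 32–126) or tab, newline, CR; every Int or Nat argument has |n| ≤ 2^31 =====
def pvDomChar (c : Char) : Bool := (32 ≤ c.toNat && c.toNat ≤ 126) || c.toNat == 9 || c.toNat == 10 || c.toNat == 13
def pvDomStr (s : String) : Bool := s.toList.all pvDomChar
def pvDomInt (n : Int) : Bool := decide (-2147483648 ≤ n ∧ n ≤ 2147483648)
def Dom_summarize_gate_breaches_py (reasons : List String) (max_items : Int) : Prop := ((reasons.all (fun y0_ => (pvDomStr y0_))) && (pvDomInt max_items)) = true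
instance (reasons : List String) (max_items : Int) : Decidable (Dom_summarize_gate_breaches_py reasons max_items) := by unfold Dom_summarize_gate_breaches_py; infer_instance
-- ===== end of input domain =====

-- B replaces A's seven-bucket dict by a one-pass tagging + stable sort + single truncation loop
-- and a counter dict (alternative decomposition, same asymptotic cost).

-- ===== PORT A =====
def pvCategories : List String :=
  ["local", "corpus", "lane", "context", "coding", "comparison", "other"]

-- inner 'for item in buckets[key]' loop; the post-append break returns early
def pvInnerA (key : String) (max_items : Int) : List String → List String → List String
  | out, [] => out
  | out, item :: rest =>
    let out' := out ++ [key ++ ": " ++ item]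
    if (out'.length : Int) ≥ max_items then out'
    else pvInnerA key max_items out' rest

-- outer 'for key in categories' loop with its own post-category break
def pvOuterA (buckets : PySem.Dict String (List String)) (max_items : Int) :
    List String → List String → List String
  | out, [] => out
  | out, key :: rest =>
    let out' := pvInnerA key max_items out (buckets.getD key [])
    if (out'.length : Int) ≥ max_items then out'
    else pvOuterA buckets max_items out' rest

def summarize_gate_breaches_py (reasons : List String) (max_items : Int) :
    List String × (List (String × Int)) :=
  let categories := pvCategories
  -- {k: [] for k in categories}
  let buckets : PySem.Dict String (List String) :=
    categories.foldl (fun d k => d.insert k []) PySem.Dict.empty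
  -- buckets[key].append(text): the key is always present, so this is Dict.modify
  let buckets := reasons.foldl (fun d text =>
    let lowered := PySem.Str.lower text
    if PySem.Str.startswith lowered "local:" then d.modify "local" [] (· ++ [text])
    else if PySem.Str.startswith lowered "corpus:" then d.modify "corpus" [] (· ++ [text])
    else if PySem.Str.startswith lowered "lane_scheduling:" then d.modify "lane" [] (· ++ [text])
    else if PySem.Str.startswith lowered "context_cache:" then d.modify "context" [] (· ++ [text])
    else if PySem.Str.startswith lowered "coding_loop:" then d.modify "coding" [] (· ++ [text])
    else if PySem.Str.startswith lowered "comparison:" then d.modify "comparison" [] (· ++ [text])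
    else d.modify "other" [] (· ++ [text])) buckets
  let out := pvOuterA buckets max_items [] categories
  -- {k: len(v) for k, v in buckets.items() if v}: bucket keys are unique, so the
  -- comprehension is exactly this filter+map over the items list
  let counts := (buckets.items.filter (fun kv => !kv.2.isEmpty)).map
    (fun kv => (kv.1, (kv.2.length : Int)))
  (out, counts)

-- ===== PORT B =====
def pvPrefixes : List (String × String) :=
  [("local:", "local"), ("corpus:", "corpus"), ("lane_scheduling:", "lane"),
   ("context_cache:", "context"), ("coding_loop:", "coding"), ("comparison:", "comparison")]

-- the 'for i, (prefix, name) in enumerate(_PREFIXES)' search with its break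
def pvTagSearch (lowered : String) : List (String × String) → Nat → Nat × String
  | [], _ => (6, "other")
  | pn :: rest, i =>
    if PySem.Str.startswith lowered pn.1 then (i, pn.2) else pvTagSearch lowered rest (i + 1)

-- the flat 'for _, cat, text in tagged' loop with its post-append break
def pvOutB (max_items : Int) : List String → List (Nat × String × String) → List String
  | out, [] => out
  | out, t :: rest =>
    let out' := out ++ [t.2.1 ++ ": " ++ t.2.2]
    if (out'.length : Int) ≥ max_items then out'
    else pvOutB max_items out' rest

def summarize_gate_breaches_py_alt (reasons : List String) (max_items : Int) :
    List String × (List (String × Int)) :=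
  let tagged := reasons.map (fun text =>
    let lowered := PySem.Str.lower text
    let ic := pvTagSearch lowered pvPrefixes 0
    (ic.1, ic.2, text))
  let tagged := PySem.List.sorted tagged (fun t => t.1)
  let out := pvOutB max_items [] tagged
  -- counts[cat] = counts.get(cat, 0) + 1
  let counts := tagged.foldl (fun d t => d.modify t.2.1 0 (· + 1))
    (PySem.Dict.empty : PySem.Dict String Int)
  (out, counts.items)

-- ===== PRECONDITION & SPEC =====
-- Pre_ excludes non-positive max_items, a degenerate limit on which A's extra post-category
-- break makes the result (zero or one summary line) depend on which bucket happens to be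
-- non-empty first — an unspecified corner where B's single post-append break emits one line.
def Pre_summarize_gate_breaches_py (reasons : List String) (max_items : Int) : Prop :=
  1 ≤ max_items
instance (reasons : List String) (max_items : Int) : Decidable (Pre_summarize_gate_breaches_py reasons max_items) := by unfold Pre_summarize_gate_breaches_py; infer_instance

def pvWitness_summarize_gate_breaches_py : List String × Int := (["local:a", "x"], 3)

def Spec_summarize_gate_breaches_py (reasons : List String) (max_items : Int) (out : List String × (List (String × Int))) : Prop := out = summarize_gate_breaches_py_alt reasons max_items
instance (reasons : List String) (max_items : Int) (out : List String × (List (String × Int))) : Decidable (Spec_summarize_gate_breaches_py reasons max_items out) := by unfold Spec_summarize_gate_breaches_py; infer_instance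

-- ===== CLAIM (what is proved, stated in full; the proofs are below) =====
def Claim_equal_summarize_gate_breaches_py : Prop := ∀ (reasons : List String) (max_items : Int), Dom_summarize_gate_breaches_py reasons max_items → Pre_summarize_gate_breaches_py reasons max_items → Spec_summarize_gate_breaches_py reasons max_items (summarize_gate_breaches_py reasons max_items)

-- ===== LEMMAS AND PROOFS =====

-- canonical description shared by both proofs
def pvIdx (text : String) : Nat :=
  if PySem.Str.startswith (PySem.Str.lower text) "local:" then 0
  else if PySem.Str.startswith (PySem.Str.lower text) "corpus:" then 1
  else if PySem.Str.startswith (PySem.Str.lower text) "lane_scheduling:" then 2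
  else if PySem.Str.startswith (PySem.Str.lower text) "context_cache:" then 3
  else if PySem.Str.startswith (PySem.Str.lower text) "coding_loop:" then 4
  else if PySem.Str.startswith (PySem.Str.lower text) "comparison:" then 5
  else 6

def pvName (i : Nat) : String :=
  if i = 0 then "local" else if i = 1 then "corpus" else if i = 2 then "lane"
  else if i = 3 then "context" else if i = 4 then "coding"
  else if i = 5 then "comparison" else "other"

def pvTag (t : String) : Nat × String × String := (pvIdx t, pvName (pvIdx t), t)

def pvBucket (i : Nat) (reasons : List String) : List String :=
  reasons.filter (fun t => pvIdx t = i)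

def pvFlat (reasons : List String) : List String :=
  (List.range 7).flatMap (fun i => (pvBucket i reasons).map (fun t => pvName i ++ ": " ++ t))

def pvCnt (reasons : List String) : List (String × Int) :=
  ((List.range 7).filter (fun i => (pvBucket i reasons).length ≠ 0)).map
    (fun i => (pvName i, ((pvBucket i reasons).length : Int)))

-- the canonical truncation loop both out-loops reduce to
def pvTake (max_items : Int) : List String → List String → List String
  | out, [] => out
  | out, s :: rest =>
    let out' := out ++ [s]
    if (out'.length : Int) ≥ max_items then out'
    else pvTake max_items out' rest

lemma pvIdx_le (t : String) : pvIdx t ≤ 6 := by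
  unfold pvIdx; split_ifs <;> omega

lemma pvNames_nodup : ((List.range 7).map pvName).Nodup := by decide

lemma pvName_inj : ∀ i ∈ List.range 7, ∀ j ∈ List.range 7, pvName i = pvName j → i = j := by
  decide

lemma pvTagSearch_eq (t : String) :
    pvTagSearch (PySem.Str.lower t) pvPrefixes 0 = (pvIdx t, pvName (pvIdx t)) := by
  simp only [pvPrefixes, pvTagSearch]
  unfold pvIdx
  split_ifs <;> rfl

lemma pvInnerA_eq (key : String) (m : Int) :
    ∀ (items out : List String),
      pvInnerA key m out items = pvTake m out (items.map (fun it => key ++ ": " ++ it)) := by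
  intro items
  induction items with
  | nil => intro out; rfl
  | cons it rest ih =>
    intro out
    simp only [pvInnerA, List.map_cons, pvTake]
    split
    · rfl
    · exact ih _

lemma pvOutB_eq (m : Int) :
    ∀ (ts : List (Nat × String × String)) (out : List String),
      pvOutB m out ts = pvTake m out (ts.map (fun t => t.2.1 ++ ": " ++ t.2.2)) := by
  intro ts
  induction ts with
  | nil => intro out; rfl
  | cons t rest ih =>
    intro out
    simp only [pvOutB, List.map_cons, pvTake]
    split
    · rfl
    · exact ih _

lemma pvTake_append (m : Int) (ys : List String) :
    ∀ (xs out : List String), (out.length : Int) < m →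
      pvTake m out (xs ++ ys) =
        if (((pvTake m out xs).length : Int) ≥ m) then pvTake m out xs
        else pvTake m (pvTake m out xs) ys := by
  intro xs
  induction xs with
  | nil =>
    intro out hout
    have e2 : pvTake m out [] = out := rfl
    rw [List.nil_append, e2, if_neg (by omega)]
  | cons x rest ih =>
    intro out hout
    have e1 : pvTake m out ((x :: rest) ++ ys)
        = if ((out ++ [x]).length : Int) ≥ m then out ++ [x]
          else pvTake m (out ++ [x]) (rest ++ ys) := rfl
    have e2 : pvTake m out (x :: rest)
        = if ((out ++ [x]).length : Int) ≥ m then out ++ [x]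
          else pvTake m (out ++ [x]) rest := rfl
    rw [e1, e2]
    by_cases h : ((out ++ [x]).length : Int) ≥ m
    · simp only [if_pos h]
    · simp only [if_neg h]
      exact ih (out ++ [x]) (by omega)

lemma pvOuterA_eq (bks : PySem.Dict String (List String)) (m : Int) :
    ∀ (cats : List String) (out : List String), (out.length : Int) < m →
      pvOuterA bks m out cats =
        pvTake m out (cats.flatMap (fun k => (bks.getD k []).map (fun it => k ++ ": " ++ it))) := by
  intro cats
  induction cats with
  | nil => intro out _; rfl
  | cons k rest ih =>
    intro out hout
    simp only [pvOuterA, List.flatMap_cons]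
    rw [pvInnerA_eq, pvTake_append m _ _ _ hout]
    split
    · rfl
    · next h => exact ih _ (by omega)

-- ---- insertion sort over bounded keys produces the category blocks ----

lemma pvInsertBy_skip {α : Type} (b : α → α → Bool) (x : α) :
    ∀ (P S : List α), (∀ y ∈ P, b x y = false) →
      PySem.List.insertBy b x (P ++ S) = P ++ PySem.List.insertBy b x S := by
  intro P
  induction P with
  | nil => intro S _; rfl
  | cons y P ih =>
    intro S hP
    simp only [List.cons_append, PySem.List.insertBy, hP y (by simp), Bool.false_eq_true,
      if_false]
    rw [ih S (fun z hz => hP z (by simp [hz]))]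

lemma pvInsertBy_front {α : Type} (b : α → α → Bool) (x : α) :
    ∀ (S : List α), (∀ y ∈ S, b x y = true) → PySem.List.insertBy b x S = x :: S := by
  intro S hS
  cases S with
  | nil => rfl
  | cons y S => simp [PySem.List.insertBy, hS y (by simp)]

lemma pvInsert_blocks_aux (x : Nat × String × String) (xs : List (Nat × String × String)) :
    ∀ (is : List Nat), is.Pairwise (· < ·) → x.1 ∈ is →
      PySem.List.insertBy (fun a c => decide (a.1 < c.1)) x
          (is.flatMap (fun i => xs.filter (fun t => t.1 = i)))
        = is.flatMap (fun i => (xs ++ [x]).filter (fun t => t.1 = i)) := by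
  intro is
  induction is with
  | nil => intro _ hk; simp at hk
  | cons i is ih =>
    intro hp hk
    have hhead : ∀ j ∈ is, i < j := fun j hj => (List.pairwise_cons.mp hp).1 j hj
    simp only [List.flatMap_cons]
    by_cases hik : i = x.1
    · rw [pvInsertBy_skip _ _ _ _ (by
        intro y hy
        have hy1 : y.1 = i := by simpa using (List.mem_filter.mp hy).2
        simp [hy1, hik])]
      rw [pvInsertBy_front _ _ _ (by
        intro y hy
        obtain ⟨j, hj, hyj⟩ := List.mem_flatMap.mp hy
        have hy1 : y.1 = j := by simpa using (List.mem_filter.mp hyj).2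
        have := hhead j hj
        simp [hy1]
        omega)]
      have htail : is.flatMap (fun i => (xs ++ [x]).filter (fun t => t.1 = i))
          = is.flatMap (fun i => xs.filter (fun t => t.1 = i)) := by
        apply List.flatMap_congr
        intro j hj
        rw [List.filter_append]
        have h1 : [x].filter (fun t => decide (t.1 = j)) = [] := by
          have := hhead j hj
          have hne : x.1 ≠ j := by omega
          simp [hne]
        simp [h1]
      rw [htail, List.filter_append (l₂ := [x])]
      have h2 : [x].filter (fun t => decide (t.1 = i)) = [x] := by
        have hxe : x.1 = i := hik.symm
        simp [hxe]
      rw [h2]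
      simp
    · have hk' : x.1 ∈ is := by
        rcases List.mem_cons.mp hk with h | h
        · exact absurd h.symm hik
        · exact h
      have hlt : i < x.1 := hhead _ hk'
      rw [pvInsertBy_skip _ _ _ _ (by
        intro y hy
        have hy1 : y.1 = i := by simpa using (List.mem_filter.mp hy).2
        simp [hy1]
        omega)]
      rw [ih (List.Pairwise.of_cons hp) hk']
      rw [List.filter_append (l₂ := [x])]
      have h1 : [x].filter (fun t => decide (t.1 = i)) = [] := by
        have hne : x.1 ≠ i := by omega
        simp [hne]
      simp [h1]

lemma pvSorted_blocks :
    ∀ (xs : List (Nat × String × String)), (∀ t ∈ xs, t.1 ≤ 6) →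
      PySem.List.sorted xs (fun t => t.1)
        = (List.range 7).flatMap (fun i => xs.filter (fun t => t.1 = i)) := by
  intro xs
  induction xs using List.reverseRecOn with
  | nil => simp [PySem.List.sorted_eq_foldl_insertBy]
  | append_singleton xs x ih =>
    intro hb
    rw [PySem.List.sorted_eq_foldl_insertBy, List.foldl_append,
      ← PySem.List.sorted_eq_foldl_insertBy]
    rw [ih (fun t ht => hb t (by simp [ht]))]
    simp only [List.foldl_cons, List.foldl_nil]
    exact pvInsert_blocks_aux x xs (List.range 7) List.pairwise_lt_range
      (List.mem_range.mpr (by have := hb x (by simp); omega))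

-- ---- Set.update over constant blocks ----

lemma pvSet_update_of_mem (s : List String) :
    ∀ (l : List String), (∀ x ∈ l, x ∈ s) → PySem.Set.update s l = s := by
  intro l
  induction l with
  | nil => intro _; rfl
  | cons x l ih =>
    intro h
    have hx : PySem.Set.add s x = s := by
      simp [PySem.Set.add, PySem.Set.contains, h x (by simp)]
    simp only [PySem.Set.update, List.foldl_cons, hx]
    exact ih (fun z hz => h z (by simp [hz]))

lemma pvSet_update_replicate (s : List String) (c : String) (hc : c ∉ s) :
    ∀ (n : Nat), PySem.Set.update s (List.replicate n c)
      = if n = 0 then s else s ++ [c] := by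
  intro n
  cases n with
  | zero => rfl
  | succ n =>
    have hadd : PySem.Set.add s c = s ++ [c] := by
      simp [PySem.Set.add, PySem.Set.contains, hc]
    simp only [List.replicate_succ, PySem.Set.update, List.foldl_cons, hadd]
    rw [show List.foldl PySem.Set.add (s ++ [c]) (List.replicate n c)
        = PySem.Set.update (s ++ [c]) (List.replicate n c) from rfl]
    rw [pvSet_update_of_mem _ _ (by intro x hx; simp [List.eq_of_mem_replicate hx])]
    simp

lemma pvSet_update_replicate_blocks :
    ∀ (ps : List (String × Nat)) (s : List String),
      (ps.map (·.1)).Nodup → (∀ p ∈ ps, p.1 ∉ s) →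
      PySem.Set.update s (ps.flatMap (fun p => List.replicate p.2 p.1))
        = s ++ (ps.filter (fun p => decide (p.2 ≠ 0))).map (·.1) := by
  intro ps
  induction ps with
  | nil => intro s _ _; simp [PySem.Set.update]
  | cons p ps ih =>
    intro s hnd hns
    have hsplit : PySem.Set.update s ((p :: ps).flatMap (fun p => List.replicate p.2 p.1))
        = PySem.Set.update (PySem.Set.update s (List.replicate p.2 p.1))
            (ps.flatMap (fun p => List.replicate p.2 p.1)) := by
      simp only [List.flatMap_cons, PySem.Set.update, List.foldl_append]
    rw [hsplit, pvSet_update_replicate s p.1 (hns p (by simp))]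
    have hnd' : (ps.map (·.1)).Nodup := (List.nodup_cons.mp (by simpa using hnd)).2
    have hp1 : p.1 ∉ ps.map (·.1) := (List.nodup_cons.mp (by simpa using hnd)).1
    by_cases hz : p.2 = 0
    · rw [if_pos hz]
      rw [ih s hnd' (fun q hq => hns q (by simp [hq]))]
      simp [hz]
    · rw [if_neg hz]
      rw [ih (s ++ [p.1]) hnd' (by
        intro q hq
        simp only [List.mem_append, List.mem_singleton]
        rintro (h | h)
        · exact hns q (by simp [hq]) h
        · exact hp1 (by rw [← h]; exact List.mem_map_of_mem hq))]
      simp [hz]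
    
lemma pvCount_flat_zero (c : String) :
    ∀ (ps : List (String × Nat)), (∀ p ∈ ps, p.1 ≠ c) →
      (ps.flatMap (fun p => List.replicate p.2 p.1)).count c = 0 := by
  intro ps
  induction ps with
  | nil => intro _; rfl
  | cons p ps ih =>
    intro h
    simp only [List.flatMap_cons, List.count_append, List.count_replicate]
    rw [if_neg (by simp [h p (by simp)])]
    simp [ih (fun q hq => h q (by simp [hq]))]

lemma pvCount_replicate_blocks (c : String) (n : Nat) :
    ∀ (ps : List (String × Nat)), (ps.map (·.1)).Nodup → (c, n) ∈ ps →
      (ps.flatMap (fun p => List.replicate p.2 p.1)).count c = n := by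
  intro ps
  induction ps with
  | nil => intro _ h; simp at h
  | cons p ps ih =>
    intro hnd hm
    have hnd' : (ps.map (·.1)).Nodup := (List.nodup_cons.mp (by simpa using hnd)).2
    have hp1 : p.1 ∉ ps.map (·.1) := (List.nodup_cons.mp (by simpa using hnd)).1
    simp only [List.flatMap_cons, List.count_append]
    rcases List.mem_cons.mp hm with h | h
    · have hc1 : p.1 = c := by rw [← h]
      have hc2 : p.2 = n := by rw [← h]
      rw [List.count_replicate, if_pos (by simp [hc1]),
        pvCount_flat_zero c ps (fun q hq he =>
          hp1 (by rw [hc1, ← he]; exact List.mem_map_of_mem hq))]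
      omega
    · have hpc : p.1 ≠ c := fun he =>
        hp1 (by rw [he]; simpa using List.mem_map_of_mem (f := fun x => x.1) h)
      rw [List.count_replicate, if_neg (by simp [hpc])]
      simp [ih hnd' h]

lemma pvName_mem : ∀ i, pvName i ∈ pvCategories := by
  intro i
  unfold pvName pvCategories
  split_ifs <;> simp

lemma pvBeq_name (i : Nat) (hi : i ∈ List.range 7) (t : String) :
    (pvName (pvIdx t) == pvName i) = decide (pvIdx t = i) := by
  by_cases h : pvIdx t = i
  · simp [h]
  · have hne : pvName (pvIdx t) ≠ pvName i := fun he =>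
      h (pvName_inj _ (List.mem_range.mpr (Nat.lt_succ_of_le (pvIdx_le t))) _ hi he)
    simp [hne, h]

lemma pvNotEmpty_eq (l : List String) : (!l.isEmpty) = decide (l.length ≠ 0) := by
  cases l <;> simp

lemma pvD0_keys :
    (pvCategories.foldl (fun d k => d.insert k ([] : List String)) PySem.Dict.empty).keys
      = pvCategories := by decide

lemma pvD0_nodup : pvCategories.Nodup := by decide

lemma pvD0_get : ∀ i ∈ List.range 7,
    (pvCategories.foldl (fun d k => d.insert k ([] : List String)) PySem.Dict.empty).getD
      (pvName i) [] = [] := by decide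

lemma pvCategories_eq : pvCategories = (List.range 7).map pvName := by decide

lemma pvA_canon (reasons : List String) (m : Int) (hm : 1 ≤ m) :
    summarize_gate_breaches_py reasons m = (pvTake m [] (pvFlat reasons), pvCnt reasons) := by
  simp only [summarize_gate_breaches_py]
  have hbody : (fun (d : PySem.Dict String (List String)) (text : String) =>
      if PySem.Str.startswith (PySem.Str.lower text) "local:" then d.modify "local" [] (· ++ [text])
      else if PySem.Str.startswith (PySem.Str.lower text) "corpus:" then d.modify "corpus" [] (· ++ [text])
      else if PySem.Str.startswith (PySem.Str.lower text) "lane_scheduling:" then d.modify "lane" [] (· ++ [text])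
      else if PySem.Str.startswith (PySem.Str.lower text) "context_cache:" then d.modify "context" [] (· ++ [text])
      else if PySem.Str.startswith (PySem.Str.lower text) "coding_loop:" then d.modify "coding" [] (· ++ [text])
      else if PySem.Str.startswith (PySem.Str.lower text) "comparison:" then d.modify "comparison" [] (· ++ [text])
      else d.modify "other" [] (· ++ [text]))
      = (fun d text => d.modify (pvName (pvIdx text)) [] (· ++ [text])) := by
    funext d t
    unfold pvIdx
    split_ifs <;> rfl
  rw [hbody]
  have hfold : reasons.foldl (fun d text => d.modify (pvName (pvIdx text)) [] (· ++ [text]))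
        (pvCategories.foldl (fun d k => d.insert k ([] : List String)) PySem.Dict.empty)
      = (reasons.map (fun t => (pvName (pvIdx t), t))).foldl
          (fun d p => d.modify p.1 [] (· ++ [p.2]))
          (pvCategories.foldl (fun d k => d.insert k ([] : List String)) PySem.Dict.empty) := by
    rw [List.foldl_map]
  rw [hfold]
  set df := (reasons.map (fun t => (pvName (pvIdx t), t))).foldl
      (fun d p => d.modify p.1 [] (· ++ [p.2]))
      (pvCategories.foldl (fun d k => d.insert k ([] : List String)) PySem.Dict.empty) with hdf
  have hget : ∀ i ∈ List.range 7, df.getD (pvName i) [] = pvBucket i reasons := by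
    intro i hi
    rw [hdf, PySem.Dict.getD_foldl_modify_append, pvD0_get i hi, List.nil_append,
      List.filter_map, List.map_map]
    rw [show ((fun x : String × String => x.2) ∘ fun t => (pvName (pvIdx t), t)) = id from rfl,
      List.map_id]
    unfold pvBucket
    apply List.filter_congr
    intro t _
    show (pvName (pvIdx t) == pvName i) = decide (pvIdx t = i)
    exact pvBeq_name i hi t
  have hkeys : df.keys = pvCategories := by
    rw [hdf]
    refine (PySem.Dict.keys_foldl_modify_key _ Prod.fst [] (fun _ p => (· ++ [p.2])) _).trans ?_
    rw [pvD0_keys, List.map_map]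
    apply pvSet_update_of_mem
    intro x hx
    obtain ⟨r, _, rfl⟩ := List.mem_map.mp hx
    exact pvName_mem _
  have hnodup : df.keys.Nodup := by rw [hkeys]; exact pvD0_nodup
  have hitems : df.items = (List.range 7).map (fun i => (pvName i, pvBucket i reasons)) := by
    rw [PySem.Dict.items_eq_map_keys df hnodup [], hkeys, pvCategories_eq, List.map_map]
    apply List.map_congr_left
    intro i hi
    show (pvName i, df.getD (pvName i) []) = (pvName i, pvBucket i reasons)
    rw [hget i hi]
  have hcnts : (df.items.filter (fun kv => !kv.2.isEmpty)).map
        (fun kv => (kv.1, (kv.2.length : Int))) = pvCnt reasons := by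
    rw [hitems, List.filter_map, List.map_map]
    rw [List.filter_congr (fun i _ => by
      show ((fun kv : String × List String => !kv.2.isEmpty) ∘ fun i => (pvName i, pvBucket i reasons)) i
          = decide ((pvBucket i reasons).length ≠ 0)
      exact pvNotEmpty_eq _)]
    unfold pvCnt
    exact List.map_congr_left (fun i _ => rfl)
  have hout : pvOuterA df m [] pvCategories = pvTake m [] (pvFlat reasons) := by
    rw [pvOuterA_eq df m pvCategories [] (by simp only [List.length_nil]; omega)]
    congr 1
    rw [pvCategories_eq, List.flatMap_map]
    unfold pvFlat
    apply List.flatMap_congr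
    intro i hi
    rw [hget i hi]
  rw [hout, hcnts]

lemma pvB_canon (reasons : List String) (m : Int) :
    summarize_gate_breaches_py_alt reasons m = (pvTake m [] (pvFlat reasons), pvCnt reasons) := by
  simp only [summarize_gate_breaches_py_alt]
  have hmap : reasons.map (fun text =>
      ((pvTagSearch (PySem.Str.lower text) pvPrefixes 0).1,
        (pvTagSearch (PySem.Str.lower text) pvPrefixes 0).2, text)) = reasons.map pvTag :=
    List.map_congr_left (fun t _ => by rw [pvTagSearch_eq]; rfl)
  rw [hmap]
  rw [pvSorted_blocks (reasons.map pvTag) (by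
    intro t ht
    obtain ⟨r, _, rfl⟩ := List.mem_map.mp ht
    exact pvIdx_le r)]
  set T := (List.range 7).flatMap
    (fun i => (reasons.map pvTag).filter (fun t => decide (t.1 = i))) with hT
  have hblock : ∀ i : Nat, (reasons.map pvTag).filter (fun t => decide (t.1 = i))
      = (pvBucket i reasons).map pvTag := fun i => by
    rw [List.filter_map]; rfl
  have hflat : T.map (fun t => t.2.1 ++ ": " ++ t.2.2) = pvFlat reasons := by
    rw [hT, List.map_flatMap]
    unfold pvFlat
    apply List.flatMap_congr
    intro i hi
    rw [hblock i, List.map_map]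
    apply List.map_congr_left
    intro r hr
    have hri : pvIdx r = i := by
      have := (List.mem_filter.mp
        (show r ∈ reasons.filter (fun t => decide (pvIdx t = i)) from hr)).2
      simpa using this
    simp only [Function.comp_def, pvTag]
    rw [hri]
  have hout : pvOutB m [] T = pvTake m [] (pvFlat reasons) := by
    rw [pvOutB_eq, hflat]
  set PS := (List.range 7).map (fun i => (pvName i, (pvBucket i reasons).length)) with hPS
  have hnames : T.map (fun t => t.2.1) = PS.flatMap (fun p => List.replicate p.2 p.1) := by
    rw [hT, hPS, List.map_flatMap, List.flatMap_map]
    apply List.flatMap_congr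
    intro i hi
    rw [hblock i, List.map_map]
    rw [List.map_congr_left (g := fun _ => pvName i) (fun r hr => by
      have hri : pvIdx r = i := by
        have := (List.mem_filter.mp
          (show r ∈ reasons.filter (fun t => decide (pvIdx t = i)) from hr)).2
        simpa using this
      simp only [Function.comp_def, pvTag]
      rw [hri])]
    rw [List.map_const']
  have hPSnodup : (PS.map (·.1)).Nodup := by
    rw [hPS, List.map_map]
    exact pvNames_nodup
  have h1 : T.foldl (fun d t => d.modify t.2.1 0 (· + 1))
        (PySem.Dict.empty : PySem.Dict String Int)
      = PySem.Dict.counter (T.map fun t => t.2.1) := by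
    rw [PySem.Dict.counter_eq_foldl, List.foldl_map]
  have hof : PySem.Set.ofList (PS.flatMap (fun p => List.replicate p.2 p.1))
      = (PS.filter (fun p => decide (p.2 ≠ 0))).map (·.1) := by
    have h := pvSet_update_replicate_blocks PS [] hPSnodup (by simp)
    simpa using h
  have hfm : (PS.filter (fun p => decide (p.2 ≠ 0))).map (·.1)
      = ((List.range 7).filter (fun i => decide ((pvBucket i reasons).length ≠ 0))).map
          (fun i => pvName i) := by
    rw [hPS, List.filter_map, List.map_map]
    rfl
  have hcnt : (T.foldl (fun d t => d.modify t.2.1 0 (· + 1))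
        (PySem.Dict.empty : PySem.Dict String Int)).items = pvCnt reasons := by
    rw [h1, PySem.Dict.items_counter, hnames, hof, hfm, List.map_map]
    unfold pvCnt
    apply List.map_congr_left
    intro i hi
    have himem : i ∈ List.range 7 := (List.mem_filter.mp hi).1
    have hcount := pvCount_replicate_blocks (pvName i) (pvBucket i reasons).length PS
      hPSnodup (by rw [hPS]; exact List.mem_map_of_mem himem)
    show (pvName i, (((PS.flatMap (fun p => List.replicate p.2 p.1)).count (pvName i) : Nat) : Int))
      = (pvName i, ((pvBucket i reasons).length : Int))
    rw [hcount]
  rw [hout, hcnt]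

-- ===== VERDICT (by name: the statement is the Claim_ definition above) =====
theorem summarize_gate_breaches_py_spec : Claim_equal_summarize_gate_breaches_py := by
  intro reasons max_items _ hpre
  unfold Spec_summarize_gate_breaches_py
  rw [pvA_canon reasons max_items hpre, pvB_canon reasons max_items]
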